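-- pv_equiv track=rewrite | github.com/evanraalte/piano_midi_tdd | piano_midi_tdd/frame.py | find_adjacent_pixels
-- ===== SOURCE A (Python) =====
-- def find_adjacent_pixels(numbers: list[int], threshold: int) -> list[tuple[int, int]]:
--     if threshold < 0:
--         raise ValueError("Threshold must be non-negative")
--
--     if any(num < 0 for num in numbers):
--         raise ValueError("Numbers in the array must be non-negative")
--
--     groups = []
--     current_group_start = None
--     last_number = None
--     for number in numbers:
--         if last_number is None:
--             current_group_start = number  # initial case
--         elif number == last_number + 1:
--             pass  # same group
--         elif number > last_number + 1:  # detect a gap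
--             if last_number - current_group_start >= threshold - 1:
--                 groups.append((current_group_start, last_number))  # add group to groups
--             current_group_start = number
--         last_number = number
--     if (
--         current_group_start is not None and last_number is not None
--     ):  # make sure both exist
--         if last_number - current_group_start >= threshold - 1:
--             groups.append((current_group_start, last_number))  # add last group
--     return groups
-- ===== SOURCE B (Python) =====
-- def find_adjacent_pixels(numbers: list[int], threshold: int) -> list[tuple[int, int]]:
--     if threshold < 0:
--         raise ValueError("Threshold must be non-negative")
--
--     if any(num < 0 for num in numbers):
--         raise ValueError("Numbers in the array must be non-negative")
--
--     # Traverse RIGHT-TO-LEFT, merging each element into the segment list built so far: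
--     # x joins the segment in front of it unless that segment starts past x+1 (a gap).
--     # segs is kept reversed (segs[-1] is the leftmost segment) so all ops are O(1).
--     segs = []
--     for x in reversed(numbers):
--         if segs and segs[-1][0] <= x + 1:
--             segs[-1] = (x, segs[-1][1])
--         else:
--             segs.append((x, x))
--     segs.reverse()
--     return [s for s in segs if s[1] - s[0] >= threshold - 1]
-- ===== Notes on version B (the rewrite author's own statement) =====
-- stated objective: alternative
-- what changed: B traverses the list right-to-left, merging each element into the head segment of an already-built segment list (or opening a new one at a gap), then filters the finished segment list by span; A scans left-to-right with None sentinels, emits filtered groups inline and flushes the trailing group separately.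
import Mathlib
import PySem

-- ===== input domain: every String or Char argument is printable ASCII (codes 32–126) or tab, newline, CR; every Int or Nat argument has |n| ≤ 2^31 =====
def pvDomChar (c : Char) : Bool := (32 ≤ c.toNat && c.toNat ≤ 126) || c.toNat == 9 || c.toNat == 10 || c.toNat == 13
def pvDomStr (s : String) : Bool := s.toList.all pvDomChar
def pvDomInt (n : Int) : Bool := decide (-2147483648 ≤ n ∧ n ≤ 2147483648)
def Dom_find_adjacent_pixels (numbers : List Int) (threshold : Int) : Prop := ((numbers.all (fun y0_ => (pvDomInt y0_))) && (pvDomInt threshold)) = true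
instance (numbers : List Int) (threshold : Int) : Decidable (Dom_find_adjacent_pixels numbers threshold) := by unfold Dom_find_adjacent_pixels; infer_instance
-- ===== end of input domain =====

-- B builds the segment list by a right-to-left traversal (each element merges into the segment in
-- front of it unless a gap separates them) and then filters by span; a different traversal order
-- and decomposition than A's left-to-right sentinel scan (objective: alternative, same cost).
-- The two raising guards (threshold < 0, a negative number) are excluded by Pre_.

-- ===== PORT A =====
-- one loop step of A; state = (groups, current_group_start, last_number).
-- In the gap branch current_group_start is never None in Python when last_number is not None;
-- the unreachable 'none' case just restarts the group.
def pvAStep (threshold : Int) (st : List (Int × Int) × Option Int × Option Int) (number : Int) :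
    List (Int × Int) × Option Int × Option Int :=
  match st with
  | (groups, cs, ln) =>
    match ln with
    | none => (groups, some number, some number)        -- initial case
    | some l =>
      if number = l + 1 then (groups, cs, some number)  -- same group
      else if number > l + 1 then                      -- detect a gap
        match cs with
        | some s =>
          if l - s ≥ threshold - 1 then (groups ++ [(s, l)], some number, some number)
          else (groups, some number, some number)
        | none => (groups, some number, some number)    -- unreachable in Python
      else (groups, cs, some number)

def find_adjacent_pixels (numbers : List Int) (threshold : Int) : List (Int × Int) :=
  let st := numbers.foldl (pvAStep threshold) ([], none, none)
  match st with
  | (groups, some s, some l) =>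
      if l - s ≥ threshold - 1 then groups ++ [(s, l)] else groups
  | (groups, _, _) => groups

-- ===== PORT B =====
-- one step of B's reversed iteration: merge x into the segment directly to its right, or open a
-- new one at a gap. Python keeps segs reversed (segs[-1] = leftmost) and reverses at the end;
-- ported exactly as the foldr over numbers, whose head is that same leftmost segment.
def pvBStep (x : Int) (segs : List (Int × Int)) : List (Int × Int) :=
  match segs with
  | (s, l) :: rest => if s ≤ x + 1 then (x, l) :: rest else (x, x) :: (s, l) :: rest
  | [] => [(x, x)]

def find_adjacent_pixels_alt (numbers : List Int) (threshold : Int) : List (Int × Int) :=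
  (numbers.foldr pvBStep []).filter (fun p => p.2 - p.1 ≥ threshold - 1)

-- ===== PRECONDITION & SPEC =====
-- Pre_ excludes exactly the inputs where A raises ValueError: a negative threshold or a negative number.
def Pre_find_adjacent_pixels (numbers : List Int) (threshold : Int) : Prop :=
  0 ≤ threshold ∧ ∀ n ∈ numbers, 0 ≤ n
instance (numbers : List Int) (threshold : Int) : Decidable (Pre_find_adjacent_pixels numbers threshold) := by unfold Pre_find_adjacent_pixels; infer_instance

def pvWitness_find_adjacent_pixels : List Int × Int := ([1, 2, 5, 6, 7, 9], 2)

def Spec_find_adjacent_pixels (numbers : List Int) (threshold : Int) (out : List (Int × Int)) : Prop := out = find_adjacent_pixels_alt numbers threshold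
instance (numbers : List Int) (threshold : Int) (out : List (Int × Int)) : Decidable (Spec_find_adjacent_pixels numbers threshold out) := by unfold Spec_find_adjacent_pixels; infer_instance

-- ===== CLAIM =====
def Claim_equal_find_adjacent_pixels : Prop := ∀ (numbers : List Int) (threshold : Int), Dom_find_adjacent_pixels numbers threshold → Pre_find_adjacent_pixels numbers threshold → Spec_find_adjacent_pixels numbers threshold (find_adjacent_pixels numbers threshold)

-- ===== LEMMAS AND PROOFS =====

-- proof-side characterisation: the segment table of a run currently (s, l) with tail rest
def pvSegsOf (s l : Int) : List Int → List (Int × Int)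
  | [] => [(s, l)]
  | y :: ys => if y > l + 1 then (s, l) :: pvSegsOf y y ys else pvSegsOf s y ys

-- the start parameter only affects the first segment's first component
theorem pvSegsOf_start (ys : List Int) : ∀ l : Int, ∃ e t, ∀ s : Int, pvSegsOf s l ys = (s, e) :: t := by
  induction ys with
  | nil => intro l; exact ⟨l, [], fun s => rfl⟩
  | cons y ys ih =>
    intro l
    by_cases h : y > l + 1
    · exact ⟨l, pvSegsOf y y ys, fun s => by simp [pvSegsOf, h]⟩
    · obtain ⟨e, t, he⟩ := ih y
      exact ⟨e, t, fun s => by simp [pvSegsOf, h, he]⟩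

-- B's foldr computes the segment table
theorem pvB_foldr (rest : List Int) : ∀ x : Int, List.foldr pvBStep [] (x :: rest) = pvSegsOf x x rest := by
  induction rest with
  | nil => intro x; rfl
  | cons y ys ih =>
    intro x
    have h1 : List.foldr pvBStep [] (x :: y :: ys) = pvBStep x (pvSegsOf y y ys) := by
      simp only [List.foldr_cons]
      rw [← List.foldr_cons (f := pvBStep) (b := ([] : List (Int × Int)))]
      rw [ih y]
    rw [h1]
    obtain ⟨e, t, he⟩ := pvSegsOf_start ys y
    by_cases h : y > x + 1
    · have hy : ¬ y ≤ x + 1 := by omega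
      simp [pvSegsOf, h, he y, pvBStep, hy]
    · have hy : y ≤ x + 1 := by omega
      simp [pvSegsOf, h, he y, he x, pvBStep, hy]

-- A's fused loop (once the state is initialised) equals the filtered segment table
theorem pvA_loop (threshold : Int) (rest : List Int) : ∀ (g : List (Int × Int)) (s l : Int),
    (match rest.foldl (pvAStep threshold) (g, some s, some l) with
      | (groups, some s', some l') =>
          if l' - s' ≥ threshold - 1 then groups ++ [(s', l')] else groups
      | (groups, _, _) => groups)
      = g ++ (pvSegsOf s l rest).filter (fun p => p.2 - p.1 ≥ threshold - 1) := by
  induction rest with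
  | nil =>
    intro g s l
    simp only [List.foldl_nil, pvSegsOf, List.filter]
    by_cases h : l - s ≥ threshold - 1
    · simp [h]
    · simp [h]
  | cons y ys ih =>
    intro g s l
    by_cases heq : y = l + 1
    · subst heq
      have hgt : ¬ (l + 1 > l + 1) := by omega
      simp only [List.foldl_cons, pvAStep, pvSegsOf, if_neg hgt]
      exact ih g s (l + 1)
    · by_cases hgt : y > l + 1
      · simp only [List.foldl_cons, pvAStep, if_neg heq, if_pos hgt, pvSegsOf]
        by_cases hk : l - s ≥ threshold - 1
        · simp only [if_pos hk]
          rw [ih (g ++ [(s, l)]) y y]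
          have h' : threshold ≤ l - s + 1 := by omega
          simp [h']
        · simp only [if_neg hk]
          rw [ih g y y]
          have h' : ¬ threshold ≤ l - s + 1 := by omega
          simp [h']
      · simp only [List.foldl_cons, pvAStep, if_neg heq, if_neg hgt, pvSegsOf]
        exact ih g s y

-- ===== VERDICT =====
theorem find_adjacent_pixels_spec : Claim_equal_find_adjacent_pixels := by
  intro numbers threshold _ _
  unfold Spec_find_adjacent_pixels find_adjacent_pixels find_adjacent_pixels_alt
  cases numbers with
  | nil => simp
  | cons x rest =>
    simp only [List.foldl_cons, pvAStep]
    rw [pvA_loop threshold rest [] x x]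
    rw [pvB_foldr rest x]
    simp
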